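-- pv_equiv track=rewrite | github.com/Soonic1k/grafos | 07 - dfs-compsFortes.py/dfs-compsFortes.py | dfs_instantes_transposto
-- ===== SOURCE A (Python) =====
-- def dfs (grafo, vertice, tempo, descoberta, finalizacao):
--     descoberta[vertice] = tempo
--     tempo += 1
--
--     for vizinho in grafo[vertice]:
--         if descoberta[vizinho] == -1:
--             tempo = dfs(grafo, vizinho, tempo, descoberta, finalizacao)
--
--     finalizacao[vertice] = tempo
--     tempo += 1
--
--     return tempo
--
-- def dfs_instantes_transposto(grafo_transposto, n, finalizacao_original):
--     descoberta = [-1] * n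
--     finalizacao_transposto = [-1] * n
--     tempo = 1
--
--     # Ordenar vértices pelo tempo de finalização decrescente
--     vertices_ordenados = sorted(range(n), key=lambda x: finalizacao_original[x], reverse=True)
--
--     for vertice in vertices_ordenados:
--         if descoberta[vertice] == -1:
--             tempo = dfs(grafo_transposto, vertice, tempo, descoberta, finalizacao_transposto)
--
--     return descoberta, finalizacao_transposto
-- ===== SOURCE B (Python) =====
-- def dfs_instantes_transposto(grafo_transposto, n, finalizacao_original):
--     descoberta = [-1] * n
--     finalizacao_transposto = [-1] * n
--     tempo = 1
--     for raiz in sorted(range(n), key=lambda x: finalizacao_original[x], reverse=True):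
--         if descoberta[raiz] != -1:
--             continue
--         pilha = [(raiz, False)]
--         while pilha:
--             v, saindo = pilha.pop()
--             if saindo:
--                 finalizacao_transposto[v] = tempo
--                 tempo += 1
--             elif descoberta[v] == -1:
--                 descoberta[v] = tempo
--                 tempo += 1
--                 pilha.append((v, True))
--                 for vizinho in reversed(grafo_transposto[v]):
--                     pilha.append((vizinho, False))
--     return descoberta, finalizacao_transposto
-- ===== Notes on version B (the rewrite author's own statement) =====
-- stated objective: alternative
-- what changed: Replaced the recursive dfs helper by an explicit-stack iterative DFS with enter/exit frames (neighbors pushed in reverse, discovery checked at pop time), producing identical timestamps without Python recursion.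
-- outside the precondition, e.g. on dfs_instantes_transposto([[5]], 1, [0]): A raises IndexError, B raises IndexError; on dfs_instantes_transposto([[-1]], 1, [0]): A returns ([1], [2]), B returns ([1], [2])
import Mathlib
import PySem

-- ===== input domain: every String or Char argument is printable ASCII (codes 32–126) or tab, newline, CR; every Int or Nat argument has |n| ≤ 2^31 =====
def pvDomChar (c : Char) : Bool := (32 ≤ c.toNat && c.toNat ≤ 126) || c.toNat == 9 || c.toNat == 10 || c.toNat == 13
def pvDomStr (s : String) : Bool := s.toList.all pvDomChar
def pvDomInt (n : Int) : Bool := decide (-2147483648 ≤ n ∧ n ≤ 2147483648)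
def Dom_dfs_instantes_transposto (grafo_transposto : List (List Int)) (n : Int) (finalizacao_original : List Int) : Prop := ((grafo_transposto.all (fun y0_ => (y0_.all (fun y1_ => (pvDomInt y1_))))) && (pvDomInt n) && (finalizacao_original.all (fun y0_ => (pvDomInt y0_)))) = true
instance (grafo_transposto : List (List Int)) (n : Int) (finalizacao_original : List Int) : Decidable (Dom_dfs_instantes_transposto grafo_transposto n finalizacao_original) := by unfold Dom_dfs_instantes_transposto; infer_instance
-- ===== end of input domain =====

-- B replaces the recursive dfs helper by an explicit-stack iterative DFS with enter/exit
-- frames (neighbors pushed in reverse, discovery checked at pop time); same timestamps.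

-- ===== PORT A =====
-- recursive `dfs` helper of A; the Nat argument is fuel making the recursion total
-- (Python's recursion always terminates here; sufficiency is proved below).
mutual
def dfsA (g : List (List Int)) : Nat → Int → Int → List Int → List Int →
    Option (Int × List Int × List Int)
  | 0, _, _, _, _ => none
  | f + 1, v, tempo, desc, fin =>
    -- descoberta[vertice] = tempo; tempo += 1
    let desc1 := PySem.List.pySetD desc v tempo
    -- for vizinho in grafo[vertice]: …
    match goA g f (PySem.List.pyGetD g v []) (tempo + 1) desc1 fin with
    | none => none
    | some (t2, d2, fi2) =>
      -- finalizacao[vertice] = tempo; tempo += 1; return tempo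
      some (t2 + 1, d2, PySem.List.pySetD fi2 v t2)
termination_by f _ _ _ _ => (f, 0)

def goA (g : List (List Int)) : Nat → List Int → Int → List Int → List Int →
    Option (Int × List Int × List Int)
  | _, [], tempo, desc, fin => some (tempo, desc, fin)
  | f, u :: us, tempo, desc, fin =>
    if PySem.List.pyGetD desc u 0 = -1 then
      match dfsA g f u tempo desc fin with
      | none => none
      | some (t', d', fi') => goA g f us t' d' fi'
    else goA g f us tempo desc fin
termination_by f us _ _ _ => (f, us.length + 1)
end

def dfs_instantes_transposto (grafo_transposto : List (List Int)) (n : Int) (finalizacao_original : List Int) : List Int × List Int :=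
  let descoberta : List Int := List.replicate n.toNat (-1)
  let finalizacao : List Int := List.replicate n.toNat (-1)
  let vertices_ordenados :=
    PySem.List.sorted (PySem.List.pyRange 0 n 1)
      (fun x => PySem.List.pyGetD finalizacao_original x 0) true
  let res := vertices_ordenados.foldl
    (fun st v =>
      match st with
      | none => none
      | some (tempo, d, fi) =>
        if PySem.List.pyGetD d v 0 = -1 then
          dfsA grafo_transposto (d.length + 1) v tempo d fi
        else some (tempo, d, fi))
    (some (1, descoberta, finalizacao))
  match res with
  | some (_, d, fi) => (d, fi)
  | none => ([], [])

-- ===== PORT B =====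
-- the while-loop over the explicit stack (head = top); the Nat argument is fuel
-- making the loop total (sufficiency is proved below).
def runB (g : List (List Int)) : Nat → List (Int × Bool) → Int → List Int → List Int →
    Option (Int × List Int × List Int)
  | 0, _, _, _, _ => none
  | _ + 1, [], tempo, desc, fin => some (tempo, desc, fin)
  | f + 1, (v, saindo) :: rest, tempo, desc, fin =>
    if saindo then
      -- finalizacao[v] = tempo; tempo += 1
      runB g f rest (tempo + 1) desc (PySem.List.pySetD fin v tempo)
    else if PySem.List.pyGetD desc v 0 = -1 then
      -- descoberta[v] = tempo; tempo += 1; push (v, True); push reversed neighbors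
      runB g f
        ((PySem.List.pyGetD g v []).reverse.foldl (fun st u => (u, false) :: st)
          ((v, true) :: rest))
        (tempo + 1) (PySem.List.pySetD desc v tempo) fin
    else runB g f rest tempo desc fin

def dfs_instantes_transposto_alt (grafo_transposto : List (List Int)) (n : Int) (finalizacao_original : List Int) : List Int × List Int :=
  let descoberta : List Int := List.replicate n.toNat (-1)
  let finalizacao : List Int := List.replicate n.toNat (-1)
  let fuel := n.toNat * (2 + 2 * (grafo_transposto.map List.length).sum) + 2
  let raizes :=
    PySem.List.sorted (PySem.List.pyRange 0 n 1)
      (fun x => PySem.List.pyGetD finalizacao_original x 0) true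
  let res := raizes.foldl
    (fun st raiz =>
      match st with
      | none => none
      | some (tempo, d, fi) =>
        if PySem.List.pyGetD d raiz 0 = -1 then
          runB grafo_transposto fuel [(raiz, false)] tempo d fi
        else some (tempo, d, fi))
    (some (1, descoberta, finalizacao))
  match res with
  | some (_, d, fi) => (d, fi)
  | none => ([], [])

-- ===== PRECONDITION & SPEC =====
-- Pre_ excludes exactly the inputs on which Python raises IndexError (n larger than the
-- graph or the key list, a neighbor ≥ n) and, additionally, negative neighbor indices,
-- where A returns only through Python's accidental negative-index wraparound.
def Pre_dfs_instantes_transposto (grafo_transposto : List (List Int)) (n : Int) (finalizacao_original : List Int) : Prop :=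
  n ≤ (grafo_transposto.length : Int) ∧ n ≤ (finalizacao_original.length : Int) ∧
  ∀ i : Nat, i < n.toNat →
    ∀ u ∈ PySem.List.pyGetD grafo_transposto (i : Int) [], 0 ≤ u ∧ u < n
instance (grafo_transposto : List (List Int)) (n : Int) (finalizacao_original : List Int) : Decidable (Pre_dfs_instantes_transposto grafo_transposto n finalizacao_original) := by unfold Pre_dfs_instantes_transposto; infer_instance

def pvWitness_dfs_instantes_transposto : List (List Int) × Int × List Int :=
  ([[1, 2], [0], [1]], 3, [4, 6, 5])

def Spec_dfs_instantes_transposto (grafo_transposto : List (List Int)) (n : Int) (finalizacao_original : List Int) (out : List Int × List Int) : Prop := out = dfs_instantes_transposto_alt grafo_transposto n finalizacao_original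
instance (grafo_transposto : List (List Int)) (n : Int) (finalizacao_original : List Int) (out : List Int × List Int) : Decidable (Spec_dfs_instantes_transposto grafo_transposto n finalizacao_original out) := by unfold Spec_dfs_instantes_transposto; infer_instance

-- ===== CLAIM (what is proved, stated in full; the proofs are below) =====
def Claim_equal_dfs_instantes_transposto : Prop := ∀ (grafo_transposto : List (List Int)) (n : Int) (finalizacao_original : List Int), Dom_dfs_instantes_transposto grafo_transposto n finalizacao_original → Pre_dfs_instantes_transposto grafo_transposto n finalizacao_original → Spec_dfs_instantes_transposto grafo_transposto n finalizacao_original (dfs_instantes_transposto grafo_transposto n finalizacao_original)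

-- ===== LEMMAS AND PROOFS =====

theorem pvWitness_ok :
    Dom_dfs_instantes_transposto pvWitness_dfs_instantes_transposto.1
      pvWitness_dfs_instantes_transposto.2.1 pvWitness_dfs_instantes_transposto.2.2 ∧
    Pre_dfs_instantes_transposto pvWitness_dfs_instantes_transposto.1
      pvWitness_dfs_instantes_transposto.2.1 pvWitness_dfs_instantes_transposto.2.2 := by
  constructor <;> decide

-- number of still-undiscovered cells: the decreasing quantity of the DFS
def pvCnt (d : List Int) : Nat := d.count (-1)

-- per-discovery step budget of the machine
def pvB (D : Nat) : Nat := 2 + 2 * D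

-- pushing the reversed neighbor list one by one = prepending the enter frames in order
theorem pvPush (l : List Int) (k : List (Int × Bool)) :
    (l.reverse).foldl (fun st u => (u, false) :: st) k
      = l.map (fun u => (u, false)) ++ k := by
  induction l generalizing k with
  | nil => rfl
  | cons a l ih => simp [List.foldl_append, ih]

-- induction package for the neighbor loop of A at fuel f:
-- the loop returns, preserves the invariants, and the machine consumes its enter
-- frames in k steps ending in the same state
def pvGoOK (g : List (List Int)) (N D f : Nat) : Prop :=
  ∀ (us : List Int) (t : Int) (d fi : List Int),
    d.length = N →
    (∀ u ∈ us, 0 ≤ u ∧ u < (N : Int)) →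
    1 ≤ t →
    pvCnt d < f →
    ∃ t' d' fi' k,
      goA g f us t d fi = some (t', d', fi') ∧
      d'.length = N ∧ t ≤ t' ∧ pvCnt d' ≤ pvCnt d ∧
      k ≤ us.length + (pvCnt d - pvCnt d') * pvB D ∧
      ∀ (rest : List (Int × Bool)) (f' : Nat),
        runB g (k + f') (us.map (fun u => (u, false)) ++ rest) t d fi
          = runB g f' rest t' d' fi'

theorem pvDfsOK (g : List (List Int)) (N D f : Nat)
    (HG : ∀ i : Nat, i < N → ∀ u ∈ PySem.List.pyGetD g (i : Int) [], 0 ≤ u ∧ u < (N : Int))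
    (HD : ∀ i : Nat, i < N → (PySem.List.pyGetD g (i : Int) []).length ≤ D)
    (hGo : pvGoOK g N D f) :
    ∀ (v t : Int) (d fi : List Int),
      d.length = N → 0 ≤ v → v < (N : Int) → 1 ≤ t →
      PySem.List.pyGetD d v 0 = -1 → pvCnt d < f + 1 →
      ∃ t' d' fi' k,
        dfsA g (f + 1) v t d fi = some (t', d', fi') ∧
        d'.length = N ∧ t ≤ t' ∧ pvCnt d' < pvCnt d ∧
        k ≤ (pvCnt d - pvCnt d') * pvB D ∧
        ∀ (rest : List (Int × Bool)) (f' : Nat),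
          runB g (k + f') ((v, false) :: rest) t d fi = runB g f' rest t' d' fi' := by
  intro v t d fi hlen hv0 hvN ht hdisc hcnt
  have hvlt : v < (d.length : Int) := by rw [hlen]; exact hvN
  have hvnat : v.toNat < d.length := by omega
  have hget : d[v.toNat] = -1 := by
    rw [PySem.List.pyGetD_eq_getElem d 0 hv0 hvlt] at hdisc; exact hdisc
  have hmem : (-1 : Int) ∈ d := hget ▸ List.getElem_mem hvnat
  have hcpos : 1 ≤ pvCnt d := List.count_pos_iff.mpr hmem
  have hset : PySem.List.pySetD d v t = d.set v.toNat t :=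
    PySem.List.pySetD_of_nonneg d t hv0
  have hcnt1 : pvCnt (d.set v.toNat t) = pvCnt d - 1 := by
    unfold pvCnt
    rw [List.count_set hvnat, hget]
    have : (t == -1) = false := by simp; omega
    simp [this]
  have hrow : PySem.List.pyGetD g v [] = PySem.List.pyGetD g ((v.toNat : Nat) : Int) [] := by
    rw [Int.toNat_of_nonneg hv0]
  have hnb : ∀ u ∈ PySem.List.pyGetD g v [], 0 ≤ u ∧ u < (N : Int) := by
    rw [hrow]; exact HG v.toNat (by omega)
  have hrowD : (PySem.List.pyGetD g v []).length ≤ D := by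
    rw [hrow]; exact HD v.toNat (by omega)
  obtain ⟨t2, d2, fi2, kg, hgo, hlen2, ht2, hcle, hkg, hrun⟩ :=
    hGo (PySem.List.pyGetD g v []) (t + 1) (d.set v.toNat t) fi
      (by rw [List.length_set]; exact hlen)
      hnb (by omega) (by omega)
  rw [hcnt1] at hcle hkg
  refine ⟨t2 + 1, d2, PySem.List.pySetD fi2 v t2, kg + 2, ?_, hlen2, by omega, by omega, ?_, ?_⟩
  · show dfsA g (f + 1) v t d fi = _
    rw [dfsA, hset, hgo]
  · -- step-count bound
    have hd2 : pvCnt d2 ≤ pvCnt d - 1 := by omega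
    have hsplit : (pvCnt d - pvCnt d2) * pvB D
        = (pvCnt d - 1 - pvCnt d2) * pvB D + pvB D := by
      have : pvCnt d - pvCnt d2 = (pvCnt d - 1 - pvCnt d2) + 1 := by omega
      rw [this, Nat.add_mul, Nat.one_mul]
    have hB : pvB D = 2 + 2 * D := rfl
    have hrd := hrowD
    omega
  · intro rest f'
    have hk : kg + 2 + f' = (kg + (f' + 1)) + 1 := by omega
    rw [hk, runB, if_neg (by simp), if_pos hdisc, pvPush, hset,
      hrun ((v, true) :: rest) (f' + 1), runB, if_pos rfl]

theorem pvGoAll (g : List (List Int)) (N D : Nat)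
    (HG : ∀ i : Nat, i < N → ∀ u ∈ PySem.List.pyGetD g (i : Int) [], 0 ≤ u ∧ u < (N : Int))
    (HD : ∀ i : Nat, i < N → (PySem.List.pyGetD g (i : Int) []).length ≤ D) :
    ∀ f, pvGoOK g N D f := by
  intro f
  induction f with
  | zero => intro us t d fi _ _ _ hcnt; omega
  | succ f ih =>
    intro us t d fi hlen hus ht hcnt
    induction us generalizing t d fi with
    | nil =>
      exact ⟨t, d, fi, 0, by rw [goA], hlen, le_refl t, le_refl _, by simp, fun rest f' => by simp⟩
    | cons u us ihus =>
      have hu := hus u (List.mem_cons_self ..)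
      by_cases hdu : PySem.List.pyGetD d u 0 = -1
      · obtain ⟨t1, d1, fi1, k1, hdfs, hlen1, ht1, hclt, hk1, hrun1⟩ :=
          pvDfsOK g N D f HG HD ih u t d fi hlen hu.1 hu.2 ht hdu (by omega)
        obtain ⟨t', d', fi', k2, hgo2, hlen', ht', hcle2, hk2, hrun2⟩ :=
          ihus t1 d1 fi1 hlen1 (fun x hx => hus x (List.mem_cons_of_mem _ hx)) (by omega)
            (by omega)
        refine ⟨t', d', fi', k1 + k2, ?_, hlen', by omega, by omega, ?_, ?_⟩
        · show goA g (f + 1) (u :: us) t d fi = _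
          rw [goA, if_pos hdu, hdfs]
          exact hgo2
        · have hsum : pvCnt d - pvCnt d1 + (pvCnt d1 - pvCnt d') = pvCnt d - pvCnt d' := by
            omega
          have hmul : (pvCnt d - pvCnt d') * pvB D
              = (pvCnt d - pvCnt d1) * pvB D + (pvCnt d1 - pvCnt d') * pvB D := by
            rw [← hsum, Nat.add_mul]
          simp only [List.length_cons]
          rw [hmul]
          omega
        · intro rest f'
          have hk : k1 + k2 + f' = k1 + (k2 + f') := by omega
          show runB g (k1 + k2 + f') ((u, false) :: (us.map (fun u => (u, false)) ++ rest))
              t d fi = _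
          rw [hk, hrun1 (us.map (fun u => (u, false)) ++ rest) (k2 + f'), hrun2 rest f']
      · obtain ⟨t', d', fi', k2, hgo2, hlen', ht', hcle2, hk2, hrun2⟩ :=
          ihus t d fi hlen (fun x hx => hus x (List.mem_cons_of_mem _ hx)) ht hcnt
        refine ⟨t', d', fi', k2 + 1, ?_, hlen', ht', hcle2,
          by simp only [List.length_cons]; omega, ?_⟩
        · show goA g (f + 1) (u :: us) t d fi = _
          rw [goA, if_neg hdu, hgo2]
        · intro rest f'
          have hk : k2 + 1 + f' = (k2 + f') + 1 := by omega
          show runB g (k2 + 1 + f') ((u, false) :: (us.map (fun u => (u, false)) ++ rest))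
              t d fi = _
          rw [hk, runB, if_neg (by simp), if_neg hdu, hrun2 rest f']

-- the outer loop over the sorted roots: both ports thread the same state
theorem pvMain (g : List (List Int)) (N D : Nat)
    (HG : ∀ i : Nat, i < N → ∀ u ∈ PySem.List.pyGetD g (i : Int) [], 0 ≤ u ∧ u < (N : Int))
    (HD : ∀ i : Nat, i < N → (PySem.List.pyGetD g (i : Int) []).length ≤ D) :
    ∀ (vs : List Int) (t : Int) (d fi : List Int),
      d.length = N → 1 ≤ t → (∀ v ∈ vs, 0 ≤ v ∧ v < (N : Int)) →
      ∃ r,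
        vs.foldl
          (fun st v =>
            match st with
            | none => none
            | some (tempo, d, fi) =>
              if PySem.List.pyGetD d v 0 = -1 then
                dfsA g (d.length + 1) v tempo d fi
              else some (tempo, d, fi))
          (some (t, d, fi)) = some r ∧
        vs.foldl
          (fun st raiz =>
            match st with
            | none => none
            | some (tempo, d, fi) =>
              if PySem.List.pyGetD d raiz 0 = -1 then
                runB g (N * pvB D + 2) [(raiz, false)] tempo d fi
              else some (tempo, d, fi))
          (some (t, d, fi)) = some r := by
  intro vs
  induction vs with
  | nil => exact fun t d fi _ _ _ => ⟨(t, d, fi), rfl, rfl⟩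
  | cons v vs ih =>
    intro t d fi hlen ht hvs
    have hv := hvs v (List.mem_cons_self ..)
    by_cases hdv : PySem.List.pyGetD d v 0 = -1
    · obtain ⟨t1, d1, fi1, k, hdfs, hlen1, ht1, hclt, hk, hrun⟩ :=
        pvDfsOK g N D N HG HD (pvGoAll g N D HG HD N) v t d fi hlen hv.1 hv.2 ht hdv
          (by have := List.count_le_length (a := (-1 : Int)) (l := d); unfold pvCnt; omega)
      have hkN : k ≤ N * pvB D := by
        calc k ≤ (pvCnt d - pvCnt d1) * pvB D := hk
          _ ≤ N * pvB D := by
              apply Nat.mul_le_mul_right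
              have : pvCnt d ≤ N := by
                have := List.count_le_length (a := (-1 : Int)) (l := d)
                unfold pvCnt; omega
              omega
      have hfuel : N * pvB D + 2 = k + (N * pvB D + 2 - k) := by omega
      have hB : runB g (N * pvB D + 2) [(v, false)] t d fi = some (t1, d1, fi1) := by
        rw [hfuel, hrun [] (N * pvB D + 2 - k)]
        have h2 : N * pvB D + 2 - k = (N * pvB D + 1 - k) + 1 := by omega
        rw [h2, runB]
      obtain ⟨r, hA, hBr⟩ := ih t1 d1 fi1 hlen1 (by omega)
        (fun x hx => hvs x (List.mem_cons_of_mem _ hx))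
      refine ⟨r, ?_, ?_⟩
      · rw [List.foldl_cons]
        simpa [hdv, hlen, hdfs] using hA
      · rw [List.foldl_cons]
        simpa [hdv, hB] using hBr
    · obtain ⟨r, hA, hBr⟩ := ih t d fi hlen ht
        (fun x hx => hvs x (List.mem_cons_of_mem _ hx))
      exact ⟨r, by rw [List.foldl_cons]; simpa [hdv] using hA,
        by rw [List.foldl_cons]; simpa [hdv] using hBr⟩

-- ===== VERDICT (by name: the statement is the Claim_ definition above) =====
theorem dfs_instantes_transposto_spec : Claim_equal_dfs_instantes_transposto := by
  intro g n fo _hDom hPre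
  obtain ⟨hg, hfo, hnb⟩ := hPre
  unfold Spec_dfs_instantes_transposto dfs_instantes_transposto dfs_instantes_transposto_alt
  set N : Nat := n.toNat with hN
  set D : Nat := (g.map List.length).sum with hD
  have hNg : N ≤ g.length := by omega
  have HG : ∀ i : Nat, i < N → ∀ u ∈ PySem.List.pyGetD g (i : Int) [], 0 ≤ u ∧ u < (N : Int) := by
    intro i hi u hu
    have := hnb i hi u hu
    constructor
    · exact this.1
    · have hn0 : 0 < n := by omega
      have : u < n := this.2
      omega
  have HD : ∀ i : Nat, i < N → (PySem.List.pyGetD g (i : Int) []).length ≤ D := by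
    intro i hi
    have hil : (i : Int) < (g.length : Int) := by omega
    rw [PySem.List.pyGetD_eq_getElem g [] (by omega) hil]
    rw [hD]
    exact List.le_sum_of_mem (List.mem_map_of_mem (List.getElem_mem _))
  have hverts : ∀ v ∈ PySem.List.sorted (PySem.List.pyRange 0 n 1)
      (fun x => PySem.List.pyGetD fo x 0) true, 0 ≤ v ∧ v < (N : Int) := by
    intro v hv
    rw [PySem.List.mem_sorted] at hv
    rw [PySem.List.mem_pyRange_one] at hv
    exact ⟨hv.1, by omega⟩
  obtain ⟨r, hA, hB⟩ := pvMain g N D HG HD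
    (PySem.List.sorted (PySem.List.pyRange 0 n 1) (fun x => PySem.List.pyGetD fo x 0) true)
    1 (List.replicate N (-1)) (List.replicate N (-1))
    (List.length_replicate) (le_refl 1) hverts
  unfold pvB at hB
  simp only []
  rw [hA, hB]
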